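-- pv_equiv track=rewrite | github.com/ASSERT-KTH/Mokav | experiments/pynguin/c4b/return-lst/generated_tests/src_1068/7/src_1068.py | func
-- ===== SOURCE A (Python) =====
-- def func(*args):
-- 	ret_values = []
--
-- 	l = args[0].split()
-- 	n = 0
-- 	for i in range(len(l)):
-- 	    l[i] = int(l[i])
-- 	    if (l[i] > n):
-- 	        n = l[i]
-- 	a = ((6 - n) + 1)
-- 	if (a == 1):
-- 	    ret_values.append('1/6')
-- 	if (a == 2):
-- 	    ret_values.append('1/3')
-- 	if (a == 3):
-- 	    ret_values.append('1/2')
-- 	if (a == 4):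
-- 	    ret_values.append('2/3')
-- 	if (a == 5):
-- 	    ret_values.append('5/6')
-- 	if (a == 6):
-- 	    ret_values.append('1/1')
--
-- 	return ret_values
-- ===== SOURCE B (Python) =====
-- def _gcd(x, y):
--     while y:
--         x, y = y, x % y
--     return x
--
-- def func(*args):
--     values = [int(t) for t in args[0].split()]
--     n = max([0] + values)
--     a = 7 - n
--     if 1 <= a <= 6:
--         g = _gcd(a, 6)
--         return [f'{a//g}/{6//g}']
--     return []
-- ===== Notes on version B (the rewrite author's own statement) =====
-- stated objective: simpler
-- what changed: Replaces A's running-max index loop plus six-way string lookup table with a parse-all/max and a closed-form gcd reduction of the fraction (7-n)/6, guarded by 1 <= 7-n <= 6.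
import Mathlib
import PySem

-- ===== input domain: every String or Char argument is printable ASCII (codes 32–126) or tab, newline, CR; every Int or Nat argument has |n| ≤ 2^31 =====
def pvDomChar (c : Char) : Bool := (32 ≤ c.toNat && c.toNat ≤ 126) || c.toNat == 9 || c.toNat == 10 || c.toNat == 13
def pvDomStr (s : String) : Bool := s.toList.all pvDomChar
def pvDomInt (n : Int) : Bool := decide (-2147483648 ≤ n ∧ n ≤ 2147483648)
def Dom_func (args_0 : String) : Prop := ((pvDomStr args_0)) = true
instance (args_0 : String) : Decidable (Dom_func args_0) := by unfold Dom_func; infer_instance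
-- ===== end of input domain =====

-- B replaces A's six-way literal lookup table by the closed-form gcd reduction of the
-- fraction a/6 (objective: simpler); return-value equivalence on inputs where A returns.

-- ===== PORT A =====
-- the for-loop: parse each token (none = ValueError, Python raises), keep the running max n
def funcLoopA : List String → Int → Option Int
  | [], n => some n
  | s :: rest, n =>
    match PySem.Int.ofStr? s with
    | none => none
    | some v => funcLoopA rest (if v > n then v else n)

def func (args_0 : String) : List String :=
  match funcLoopA (PySem.Str.split₀ args_0) 0 with
  | none => []   -- unreachable under Pre_func: Python raises ValueError here
  | some n =>
    let a := (6 - n) + 1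
    let r : List String := []
    let r := if a = 1 then r ++ ["1/6"] else r
    let r := if a = 2 then r ++ ["1/3"] else r
    let r := if a = 3 then r ++ ["1/2"] else r
    let r := if a = 4 then r ++ ["2/3"] else r
    let r := if a = 5 then r ++ ["5/6"] else r
    let r := if a = 6 then r ++ ["1/1"] else r
    r

-- ===== PORT B =====
-- Source B's _gcd: while y: x, y = y, x % y  (fuel |y|+1 always suffices: |x % y| < |y|)
def gcdAux : Nat → Int → Int → Int
  | 0, x, _ => x
  | fuel + 1, x, y => if y = 0 then x else gcdAux fuel y (PySem.Int.mod x y)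

def gcdLoopB (x y : Int) : Int := gcdAux (y.natAbs + 1) x y

def func_alt (args_0 : String) : List String :=
  match (PySem.Str.split₀ args_0).mapM PySem.Int.ofStr? with
  | none => []   -- unreachable under Pre_func: Python raises ValueError here
  | some vs =>
    let n := (PySem.List.max? ((0 : Int) :: vs) (fun y => y)).getD 0
    let a := 7 - n
    if 1 ≤ a ∧ a ≤ 6 then
      let g := gcdLoopB a 6
      [String.ofList (PySem.Int.toChars (PySem.Int.floordiv a g) ++
        '/' :: PySem.Int.toChars (PySem.Int.floordiv 6 g))]
    else []

-- ===== PRECONDITION & SPEC =====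
-- Pre_ excludes exactly the inputs where some whitespace-split token is not int()-parsable:
-- there Python A raises ValueError.
def Pre_func (args_0 : String) : Prop :=
  (PySem.Str.split₀ args_0).all (fun t => (PySem.Int.ofStr? t).isSome) = true
instance (args_0 : String) : Decidable (Pre_func args_0) := by unfold Pre_func; infer_instance

def pvWitness_func : String := "3 5"

def Spec_func (args_0 : String) (out : List String) : Prop := out = func_alt args_0
instance (args_0 : String) (out : List String) : Decidable (Spec_func args_0 out) := by unfold Spec_func; infer_instance

-- ===== CLAIM (what is proved, stated in full; the proofs are below) =====
def Claim_equal_func : Prop := ∀ (args_0 : String), Dom_func args_0 → Pre_func args_0 → Spec_func args_0 (func args_0)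

-- ===== LEMMAS AND PROOFS =====

-- A's running-max loop computes the max-fold of the parsed values (when all parse)
theorem funcLoopA_eq (toks : List String) (acc : Int) :
    funcLoopA toks acc = (toks.mapM PySem.Int.ofStr?).map (fun vs => vs.foldl max acc) := by
  induction toks generalizing acc with
  | nil => simp [funcLoopA]
  | cons s rest ih =>
    simp only [funcLoopA, List.mapM_cons]
    cases PySem.Int.ofStr? s with
    | none => rfl
    | some v =>
      have : (if v > acc then v else acc) = max acc v := by
        simp [max_def]; omega
      simp [this, ih, Option.map_bind]
      cases rest.mapM PySem.Int.ofStr? <;> rfl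

-- the six-way table equals the gcd-reduced fraction, for every possible max n
theorem table_eq_gcd (n : Int) :
    (let a := (6 - n) + 1
     let r : List String := []
     let r := if a = 1 then r ++ ["1/6"] else r
     let r := if a = 2 then r ++ ["1/3"] else r
     let r := if a = 3 then r ++ ["1/2"] else r
     let r := if a = 4 then r ++ ["2/3"] else r
     let r := if a = 5 then r ++ ["5/6"] else r
     let r := if a = 6 then r ++ ["1/1"] else r
     r) =
    (let a := 7 - n
     if 1 ≤ a ∧ a ≤ 6 then
       let g := gcdLoopB a 6
       [String.ofList (PySem.Int.toChars (PySem.Int.floordiv a g) ++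
         '/' :: PySem.Int.toChars (PySem.Int.floordiv 6 g))]
     else []) := by
  have hsame : (6 - n) + 1 = 7 - n := by ring
  by_cases hb : 1 ≤ 7 - n ∧ 7 - n ≤ 6
  · have h1 : 1 ≤ n := by omega
    have h6 : n ≤ 6 := by omega
    interval_cases n <;> rfl
  · have : ∀ k : Int, 1 ≤ k → k ≤ 6 → (6 - n) + 1 ≠ k := by omega
    simp only [hsame]
    rw [if_neg hb]
    simp [this 1 (by omega) (by omega), this 2 (by omega) (by omega),
          this 3 (by omega) (by omega), this 4 (by omega) (by omega),
          this 5 (by omega) (by omega), this 6 (by omega) (by omega), ← hsame]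

-- ===== VERDICT (by name: the statement is the Claim_ definition above) =====
theorem func_spec : Claim_equal_func := by
  intro args_0 _ _
  unfold Spec_func func func_alt
  rw [funcLoopA_eq]
  cases hm : (PySem.Str.split₀ args_0).mapM PySem.Int.ofStr? with
  | none => rfl
  | some vs =>
    simp only [Option.map_some]
    have hmax : PySem.List.max? ((0 : Int) :: vs) (fun y => y) = some (vs.foldl max 0) :=
      PySem.List.max?_id_cons 0 vs
    rw [hmax]
    exact table_eq_gcd (vs.foldl max 0)
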